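-- pv_equiv track=rewrite | github.com/piegeek/AlgorithmsPractice | Practice/COS_Pro_1급_Python/1급 Python_정답/Python 1급 정답_05.py | func_c
-- ===== SOURCE A (Python) =====
-- def func_c(arr, count):
--     answer = -1
--     for idx, elem in enumerate(arr):
--         if elem == count:
--             continue
--         if answer == -1:
--             answer = idx
--         elif arr[answer] < elem:
--             answer = idx #here
--     return answer
-- ===== SOURCE B (Python) =====
-- def func_c(arr, count):
--     filtered = [x for x in arr if x != count]
--     if not filtered:
--         return -1
--     return arr.index(max(filtered))
-- ===== Notes on version B (the rewrite author's own statement) =====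
-- stated objective: simpler
-- what changed: Replaces A's single-pass accumulator argmax loop (with self-indexing arr[answer]) by a value-first decomposition: filter out elements equal to count, take max of the values, then locate its first index with arr.index.
import Mathlib
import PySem

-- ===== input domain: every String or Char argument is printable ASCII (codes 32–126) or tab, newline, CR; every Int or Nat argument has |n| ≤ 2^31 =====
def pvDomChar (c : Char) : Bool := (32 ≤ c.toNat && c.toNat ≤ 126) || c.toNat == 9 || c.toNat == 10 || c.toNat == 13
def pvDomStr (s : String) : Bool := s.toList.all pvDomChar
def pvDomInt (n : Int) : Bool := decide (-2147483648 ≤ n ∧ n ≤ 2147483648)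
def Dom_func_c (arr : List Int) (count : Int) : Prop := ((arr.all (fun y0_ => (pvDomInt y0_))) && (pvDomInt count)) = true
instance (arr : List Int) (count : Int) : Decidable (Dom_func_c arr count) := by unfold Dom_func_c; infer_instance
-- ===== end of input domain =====

-- B replaces A's single-pass accumulator argmax loop by a simpler value-first decomposition:
-- filter out elements equal to count, take the max of the remaining values, locate its first index.

-- ===== PORT A =====
-- A's loop body: state 'answer'; 'arr[answer]' is read only when answer ≠ -1, where answer is
-- a valid nonnegative index, so 'pyGetD arr answer 0' is exact there (the default is never used).
def funcCStep (arr : List Int) (count : Int) (answer : Int) (p : Int × Int) : Int :=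
  if p.2 == count then answer
  else if answer == -1 then p.1
  else if PySem.List.pyGetD arr answer 0 < p.2 then p.1 else answer

def func_c (arr : List Int) (count : Int) : Int :=
  (PySem.List.enumerate arr 0).foldl (funcCStep arr count) (-1)

-- ===== PORT B =====
def func_c_alt (arr : List Int) (count : Int) : Int :=
  let filtered := arr.filter (fun x => x != count)
  match PySem.List.max? filtered (fun y => y) with
  | none => -1
  | some m =>
    match PySem.List.index? arr m with
    | some i => (i : Int)
    | none => -1   -- unreachable: m ∈ filtered ⊆ arr, so arr.index(m) never raises

-- ===== PRECONDITION & SPEC =====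
def Spec_func_c (arr : List Int) (count : Int) (out : Int) : Prop := out = func_c_alt arr count
instance (arr : List Int) (count : Int) (out : Int) : Decidable (Spec_func_c arr count out) := by unfold Spec_func_c; infer_instance

-- ===== CLAIM (what is proved, stated in full; the proofs are below) =====
def Claim_equal_func_c : Prop := ∀ (arr : List Int) (count : Int), Dom_func_c arr count → Spec_func_c arr count (func_c arr count)

-- ===== LEMMAS AND PROOFS =====

-- pyGetD at an in-range nonnegative index ignores an appended suffix
lemma pyGetD_append_left (l t : List Int) (j : Int) (hj0 : 0 ≤ j) (hj : j.toNat < l.length) :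
    PySem.List.pyGetD (l ++ t) j 0 = PySem.List.pyGetD l j 0 := by
  rw [PySem.List.pyGetD_of_nonneg _ _ hj0, PySem.List.pyGetD_of_nonneg _ _ hj0,
    List.getD_eq_getElem?_getD, List.getD_eq_getElem?_getD, List.getElem?_append_left hj]

-- the fold over the prefix never reads past l, so an appended suffix does not change it
lemma fold_append_agnostic (l t : List Int) (c : Int) :
    ∀ (es : List (Int × Int)) (a : Int),
      (∀ p ∈ es, 0 ≤ p.1 ∧ p.1.toNat < l.length) →
      (a = -1 ∨ (0 ≤ a ∧ a.toNat < l.length)) →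
      es.foldl (funcCStep (l ++ t) c) a = es.foldl (funcCStep l c) a := by
  intro es
  induction es with
  | nil => intro a _ _; rfl
  | cons p es ih =>
    intro a hes ha
    have hp := hes p (List.mem_cons_self)
    have hstep : funcCStep (l ++ t) c a p = funcCStep l c a p := by
      unfold funcCStep
      rcases ha with ha | ⟨ha0, halt⟩
      · subst ha; simp
      · rw [pyGetD_append_left l t a ha0 halt]
    have hinv : funcCStep l c a p = -1 ∨
        (0 ≤ funcCStep l c a p ∧ (funcCStep l c a p).toNat < l.length) := by
      unfold funcCStep
      split_ifs with h1 h2 h3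
      · exact ha
      · exact Or.inr hp
      · exact Or.inr hp
      · exact ha
    rw [List.foldl_cons, List.foldl_cons, hstep,
      ih (funcCStep l c a p) (fun q hq => hes q (List.mem_cons_of_mem _ hq)) hinv]

-- the core equivalence, by induction on arr from the back
lemma func_c_eq_alt (arr : List Int) (c : Int) : func_c arr c = func_c_alt arr c := by
  induction arr using List.reverseRecOn with
  | nil => rfl
  | append_singleton l x ih =>
    -- peel off the last loop iteration; the fold over the prefix equals func_c l c
    have hprefix : (PySem.List.enumerate l 0).foldl (funcCStep (l ++ [x]) c) (-1) = func_c l c := by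
      apply fold_append_agnostic
      · intro p hp
        rcases (PySem.List.mem_enumerate_iff l 0 p).1 hp with ⟨k, hk, hpk⟩
        subst hpk; constructor <;> simp; omega
      · exact Or.inl rfl
    unfold func_c
    rw [PySem.List.enumerate_append, List.foldl_append]
    unfold func_c at hprefix ih
    rw [hprefix, ih]
    simp only [PySem.List.enumerate_cons, PySem.List.enumerate_nil, List.foldl_cons,
      List.foldl_nil, zero_add]
    by_cases hxc : x = c
    · -- appended element is skipped by the loop and by the filter
      subst hxc
      unfold funcCStep
      simp only [beq_self_eq_true, if_true]
      unfold func_c_alt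
      rw [List.filter_append]
      simp only [List.filter_cons, List.filter_nil, bne_self_eq_false, Bool.false_eq_true,
        if_false, List.append_nil]
      cases hm : PySem.List.max? (l.filter (fun y => y != x)) (fun y => y) with
      | none => rfl
      | some m =>
        have hmem : m ∈ l := List.mem_of_mem_filter (PySem.List.max?_mem hm)
        simp only [PySem.List.index?_append_of_mem _ hmem]
    · have hxc' : (x == c) = false := by simp [hxc]
      have hfil : (l ++ [x]).filter (fun y => y != c) = l.filter (fun y => y != c) ++ [x] := by
        rw [List.filter_append]
        simp [hxc]
      cases hF : l.filter (fun y => y != c) with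
      | nil =>
        -- no eligible element in l: loop state is still -1 and the filter of l is empty
        have halt : func_c_alt l c = -1 := by
          unfold func_c_alt
          simp only [hF]
          rfl
        have hxnotl : x ∉ l := by
          intro hx
          have : x ∈ l.filter (fun y => y != c) := List.mem_filter.2 ⟨hx, by simp [hxc]⟩
          rw [hF] at this
          exact absurd this (List.not_mem_nil)
        rw [halt]
        unfold funcCStep
        simp only [hxc', Bool.false_eq_true, if_false, beq_self_eq_true, if_true]
        unfold func_c_alt
        simp only [hfil, hF, List.nil_append]
        rw [PySem.List.max?_id_cons]
        simp only [List.foldl_nil]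
        rw [PySem.List.index?_append_singleton_self l x hxnotl]
      | cons h t =>
        have hm : PySem.List.max? (l.filter (fun y => y != c)) (fun y => y)
            = some (List.foldl max h t) := by
          rw [hF]; exact PySem.List.max?_id_cons h t
        set m := List.foldl max h t with hmdef
        have hmem : m ∈ l := List.mem_of_mem_filter (PySem.List.max?_mem hm)
        cases hidx : PySem.List.index? l m with
        | none =>
          have := (PySem.List.index?_isSome_iff l m).2 hmem
          rw [hidx] at this; exact absurd this (by simp)
        | some j =>
          obtain ⟨hjlt, hjval, _⟩ := PySem.List.getElem_of_index?_eq_some hidx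
          have halt : func_c_alt l c = (j : Int) := by
            unfold func_c_alt
            simp only [hm, hidx]
          have hget : PySem.List.pyGetD (l ++ [x]) (j : Int) 0 = m := by
            rw [pyGetD_append_left l [x] (j : Int) (by positivity) (by simpa using hjlt),
              PySem.List.pyGetD_eq_getElem l 0 (by positivity) (by simpa using hjlt)]
            simpa using hjval
          rw [halt]
          unfold funcCStep
          simp only [hxc', Bool.false_eq_true, if_false]
          have hjne : ((j : Int) == -1) = false := by simp
          rw [hjne]
          simp only [Bool.false_eq_true, if_false, hget]
          have hmax : PySem.List.max? ((l ++ [x]).filter (fun y => y != c)) (fun y => y)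
              = some (max m x) := by
            rw [hfil, hF, List.cons_append, PySem.List.max?_id_cons, List.foldl_append]
            simp [hmdef]
          by_cases hlt : m < x
          · -- the new element is the strict max: both sides return l.length
            have hxnotl : x ∉ l := by
              intro hx
              have hxf : x ∈ l.filter (fun y => y != c) := List.mem_filter.2 ⟨hx, by simp [hxc]⟩
              have := PySem.List.max?_isMax hm x hxf
              exact absurd hlt (by simpa using not_lt.2 this)
            rw [if_pos hlt]
            unfold func_c_alt
            simp only [hmax, max_eq_right (le_of_lt hlt)]
            rw [PySem.List.index?_append_singleton_self l x hxnotl]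
          · -- the old max stays: both sides return j
            rw [if_neg hlt]
            unfold func_c_alt
            simp only [hmax, max_eq_left (not_lt.1 hlt)]
            rw [PySem.List.index?_append_of_mem _ hmem, hidx]

-- ===== VERDICT (by name: the statement is the Claim_ definition above) =====
theorem func_c_spec : Claim_equal_func_c := by
  intro arr count _
  unfold Spec_func_c
  exact func_c_eq_alt arr count
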